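-- pv_equiv track=rewrite | github.com/6seva6/Python_Fundamentals | List Advanced/group_of_10's.py | sorting_in_groups
-- ===== SOURCE A (Python) =====
-- def sorting_in_groups(sorting_list):
--     """
--     accpets a list of numbers, filter and return sorting groups by 10's
--     """
--     result = []
--     current_max = int((((max(sorting_list)) + 9) // 10) * 10)
--     total_groups = current_max / 10
--     for _ in range (int(total_groups)):
--         current_group = list(filter(lambda x: current_max - 10 <= x <= current_max, sorting_list))
--         sorting_list = [num for num in sorting_list if num not in current_group]
--         result.append(f"Group of {current_max}'s: {current_group}")
--         current_max -= 10
--     return result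
-- ===== SOURCE B (Python) =====
-- def sorting_in_groups(sorting_list):
--     """
--     accpets a list of numbers, filter and return sorting groups by 10's
--     """
--     top = ((max(sorting_list) + 9) // 10) * 10
--     n = top // 10
--     if n <= 0:
--         return []
--     buckets = [[] for _ in range(n)]
--     for x in sorting_list:
--         if x >= 0:
--             g = min(x // 10 + 1, n)
--             buckets[g - 1].append(x)
--     return [f"Group of {(i + 1) * 10}'s: {buckets[i]}" for i in range(n - 1, -1, -1)]
-- ===== Notes on version B (the rewrite author's own statement) =====
-- stated objective: faster
-- what changed: Replaces A's per-group rescan (filter + rebuild of the whole remaining list for every group of ten) by a single bucketing pass that drops each element into bucket min(x//10+1, n)-1, then formats the buckets top-down.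
import Mathlib
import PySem

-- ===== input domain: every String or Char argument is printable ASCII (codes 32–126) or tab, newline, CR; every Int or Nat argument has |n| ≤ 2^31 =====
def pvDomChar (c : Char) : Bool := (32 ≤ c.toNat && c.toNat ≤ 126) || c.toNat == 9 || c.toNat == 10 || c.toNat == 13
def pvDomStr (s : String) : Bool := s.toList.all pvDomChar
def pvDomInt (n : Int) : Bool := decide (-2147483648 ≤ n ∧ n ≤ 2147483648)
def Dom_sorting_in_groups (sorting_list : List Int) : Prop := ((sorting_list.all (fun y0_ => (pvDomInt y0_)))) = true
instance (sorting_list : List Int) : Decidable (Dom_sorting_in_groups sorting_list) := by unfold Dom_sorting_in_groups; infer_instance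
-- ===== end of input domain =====

-- B replaces A's per-group rescan of the whole list (O(G·N)) by one bucketing pass (O(N+G)); same return value.

-- ===== PORT A =====
-- shared formatting helper: Python's f"Group of {g}'s: {grp}" (list repr = "[a, b, …]")
def pvGroupLine (g : Int) (grp : List Int) : String :=
  "Group of " ++ PySem.Int.toStr g ++ "'s: " ++
    ("[" ++ String.intercalate ", " (grp.map PySem.Int.toStr) ++ "]")

-- the for-loop of A: state = (remaining sorting_list, current_max, result)
def sortingLoopA : Nat → List Int → Int → List String → List String
  | 0, _, _, result => result
  | fuel+1, sl, current_max, result =>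
      let current_group := sl.filter (fun x => decide (current_max - 10 ≤ x) && decide (x ≤ current_max))
      let sl' := sl.filter (fun num => !(current_group.contains num))
      sortingLoopA fuel sl' (current_max - 10) (result ++ [pvGroupLine current_max current_group])

def sorting_in_groups (sorting_list : List Int) : List String :=
  -- max(sorting_list) raises on []: Pre_ excludes the empty list; getD 0 is never used under Pre_
  let current_max := PySem.Int.floordiv (((PySem.List.max? sorting_list (fun x => x)).getD 0) + 9) 10 * 10
  -- int(current_max / 10): exact float division (10 ∣ current_max), truncating conversion
  let total_groups := PySem.Int.truncdiv current_max 10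
  sortingLoopA total_groups.toNat sorting_list current_max []

-- ===== PORT B =====
-- one pass: element x ≥ 0 is appended to bucket index min(x // 10 + 1, n) - 1
def sortingBucketsB (sorting_list : List Int) (n : Int) : List (List Int) :=
  sorting_list.foldl (fun buckets x =>
    if 0 ≤ x then
      let g := min (PySem.Int.floordiv x 10 + 1) n
      buckets.set (g - 1).toNat ((buckets.getD (g - 1).toNat []) ++ [x])
    else buckets) (List.replicate n.toNat [])

def sorting_in_groups_alt (sorting_list : List Int) : List String :=
  let top := PySem.Int.floordiv (((PySem.List.max? sorting_list (fun x => x)).getD 0) + 9) 10 * 10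
  let n := PySem.Int.floordiv top 10
  if n ≤ 0 then []
  else
    (PySem.List.pyRange (n - 1) (-1) (-1)).map (fun i =>
      pvGroupLine ((i + 1) * 10) (PySem.List.pyGetD (sortingBucketsB sorting_list n) i []))

-- ===== PRECONDITION & SPEC =====
-- Pre_ excludes only the empty list, on which A's max(sorting_list) raises ValueError.
def Pre_sorting_in_groups (sorting_list : List Int) : Prop := sorting_list ≠ []
instance (sorting_list : List Int) : Decidable (Pre_sorting_in_groups sorting_list) := by unfold Pre_sorting_in_groups; infer_instance
def pvWitness_sorting_in_groups : List Int := ([3, 17, -4, 10])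

def Spec_sorting_in_groups (sorting_list : List Int) (out : List String) : Prop := out = sorting_in_groups_alt sorting_list
instance (sorting_list : List Int) (out : List String) : Decidable (Spec_sorting_in_groups sorting_list out) := by unfold Spec_sorting_in_groups; infer_instance

-- ===== CLAIM (what is proved, stated in full; the proofs are below) =====
def Claim_equal_sorting_in_groups : Prop := ∀ (sorting_list : List Int), Dom_sorting_in_groups sorting_list → Pre_sorting_in_groups sorting_list → Spec_sorting_in_groups sorting_list (sorting_in_groups sorting_list)

-- ===== LEMMAS AND PROOFS =====

-- the bucket test both characterizations share: x lands in 0-based bucket i (cap n)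
def pvBucketP (n : Int) (i : Nat) (x : Int) : Bool :=
  decide (min (PySem.Int.floordiv x 10 + 1) n = (i : Int) + 1)

theorem pv_pyRange_down (m : Nat) :
    PySem.List.pyRange ((m : Int) - 1) (-1) (-1) = List.map (fun (i : Nat) => (i : Int)) (List.range m).reverse := by
  unfold PySem.List.pyRange
  rcases Nat.eq_zero_or_pos m with h | h
  · subst h; decide
  · rw [if_neg (by norm_num), if_neg (by norm_num), if_pos (by omega)]
    have hc : (((m : Int) - 1 - (-1) + - -1 - 1) / -(-1)).toNat = m := by
      norm_num
    rw [hc]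
    show List.map (fun k : Nat => (m:Int) - 1 + -1 * (k:Int)) (List.range m)
        = List.map (fun (i : Nat) => (i : Int)) (List.range m).reverse
    apply List.ext_getElem
    · simp
    · intro j h1 h2
      simp only [List.length_map, List.length_range] at h1
      simp only [List.getElem_map, List.getElem_range, List.getElem_reverse, List.length_range]
      omega

theorem pv_loopA_char (k : Nat) :
    ∀ (sl : List Int) (res : List String), (∀ x ∈ sl, x ≤ 10 * (k : Int)) →
      sortingLoopA k sl (10 * (k : Int)) res
        = res ++ ((List.range k).reverse.map (fun (i : Nat) =>
            pvGroupLine (10 * ((i : Int) + 1)) (sl.filter (pvBucketP (k : Int) i)))) := by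
  induction k with
  | zero => intro sl res hub; simp [sortingLoopA]
  | succ k ih =>
    intro sl res hub
    have hbr : ∀ x : Int, ((k : Int) ≤ PySem.Int.floordiv x 10 ↔ (k : Int) * 10 ≤ x) :=
      fun x => PySem.Int.le_floordiv_iff_mul_le (by norm_num)
    have hbr2 : ∀ x : Int, (PySem.Int.floordiv x 10 < (k : Int) ↔ x < (k : Int) * 10) :=
      fun x => PySem.Int.floordiv_lt_iff_lt_mul (by norm_num)
    have hcg : sl.filter (fun x => decide (10 * ((k:Int)+1) - 10 ≤ x) && decide (x ≤ 10 * ((k:Int)+1)))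
        = sl.filter (pvBucketP ((k:Int) + 1) k) := by
      apply List.filter_congr
      intro x hx
      have hu := hub x hx
      push_cast at hu
      rw [Bool.eq_iff_iff]
      simp only [Bool.and_eq_true, decide_eq_true_eq, pvBucketP]
      have h1 := hbr x
      omega
    have hsl2 : sl.filter (fun num => !((sl.filter (pvBucketP ((k:Int) + 1) k)).contains num))
        = sl.filter (fun x => decide (x < 10 * (k : Int))) := by
      apply List.filter_congr
      intro x hx
      rw [List.contains_eq_mem, Bool.eq_iff_iff]
      simp only [Bool.not_eq_true', decide_eq_false_iff_not, decide_eq_true_eq,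
        List.mem_filter, pvBucketP, hx, true_and, decide_eq_true_eq]
      have h1 := hbr x
      have h2 := hbr2 x
      omega
    have hdrop : ∀ i : Nat, i < k → ∀ x : Int,
        (pvBucketP ((k:Int)+1) i x = (pvBucketP (k:Int) i x && decide (x < 10 * (k:Int)))) := by
      intro i hik x
      rw [Bool.eq_iff_iff]
      simp only [Bool.and_eq_true, decide_eq_true_eq, pvBucketP]
      have h1 := hbr x
      have h2 := hbr2 x
      omega
    show sortingLoopA (k+1) sl (10 * ((k:Int)+1)) res
        = res ++ ((List.range (k+1)).reverse.map (fun (i : Nat) =>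
            pvGroupLine (10 * ((i : Int) + 1)) (sl.filter (pvBucketP ((k : Int) + 1) i))))
    unfold sortingLoopA
    simp only
    rw [hcg, hsl2]
    have h10 : 10 * ((k:Int)+1) - 10 = 10 * (k : Int) := by ring
    rw [h10]
    conv_rhs => rw [List.range_succ, List.reverse_append, List.reverse_singleton,
      List.singleton_append, List.map_cons, List.append_cons]
    rw [ih _ _ (by
      intro x hx
      have h2 := (List.mem_filter.mp hx).2
      simp only [decide_eq_true_eq] at h2
      omega)]
    refine congrArg (fun L => res ++ [pvGroupLine (10 * ((k:Int) + 1)) (List.filter (pvBucketP ((k:Int) + 1) k) sl)] ++ L) ?_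
    apply List.map_congr_left
    intro i hi
    have hik : i < k := List.mem_range.mp (List.mem_reverse.mp hi)
    congr 1
    rw [List.filter_filter]
    apply List.filter_congr
    intro x hx
    rw [hdrop i hik x]


theorem pv_bucketsB_char (l : List Int) :
    ∀ (b : List (List Int)) (n : Int), 1 ≤ n → b.length = n.toNat →
      ∀ (i : Nat), i < n.toNat →
        (l.foldl (fun buckets x =>
            if 0 ≤ x then
              let g := min (PySem.Int.floordiv x 10 + 1) n
              buckets.set (g - 1).toNat ((buckets.getD (g - 1).toNat []) ++ [x])
            else buckets) b).getD i []
          = b.getD i [] ++ l.filter (pvBucketP n i) := by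
  induction l with
  | nil => intro b n hn hb i hi; simp
  | cons x l ih =>
    intro b n hn hb i hi
    simp only [List.foldl_cons]
    have hfd0 : ((0:Int) ≤ PySem.Int.floordiv x 10 ↔ (0:Int) * 10 ≤ x) :=
      PySem.Int.le_floordiv_iff_mul_le (by norm_num)
    have hfdneg : (PySem.Int.floordiv x 10 < (0:Int) ↔ x < (0:Int) * 10) :=
      PySem.Int.floordiv_lt_iff_lt_mul (by norm_num)
    by_cases hx : (0:Int) ≤ x
    · rw [if_pos hx]
      have hg1 : 1 ≤ min (PySem.Int.floordiv x 10 + 1) n := by omega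
      have hgn : min (PySem.Int.floordiv x 10 + 1) n ≤ n := by omega
      have hidx : (min (PySem.Int.floordiv x 10 + 1) n - 1).toNat < b.length := by
        rw [hb]; omega
      rw [ih _ n hn (by rw [List.length_set, hb]) i hi]
      by_cases heq : (min (PySem.Int.floordiv x 10 + 1) n - 1).toNat = i
      · have hset : (b.set (min (PySem.Int.floordiv x 10 + 1) n - 1).toNat
              ((b.getD (min (PySem.Int.floordiv x 10 + 1) n - 1).toNat []) ++ [x])).getD i []
            = b.getD i [] ++ [x] := by
          rw [List.getD_eq_getElem _ _ (by rw [List.length_set, hb]; exact hi),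
            List.getElem_set, if_pos heq, heq]
        rw [hset]
        have hp : pvBucketP n i x = true := by
          simp only [pvBucketP, decide_eq_true_eq]
          omega
        rw [List.filter_cons_of_pos hp, List.append_assoc, List.singleton_append]
      · have hset : (b.set (min (PySem.Int.floordiv x 10 + 1) n - 1).toNat
              ((b.getD (min (PySem.Int.floordiv x 10 + 1) n - 1).toNat []) ++ [x])).getD i []
            = b.getD i [] := by
          rw [List.getD_eq_getElem _ _ (by rw [List.length_set, hb]; exact hi),
            List.getElem_set, if_neg heq]
          exact (List.getD_eq_getElem b [] (by rw [hb]; exact hi)).symm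
        rw [hset]
        have hp : pvBucketP n i x = false := by
          simp only [pvBucketP, decide_eq_false_iff_not]
          omega
        rw [List.filter_cons_of_neg (by simp [hp])]
    · rw [if_neg hx]
      rw [ih b n hn hb i hi]
      have hp : pvBucketP n i x = false := by
        simp only [pvBucketP, decide_eq_false_iff_not]
        omega
      rw [List.filter_cons_of_neg (by simp [hp])]

-- ===== VERDICT (by name: the statement is the Claim_ definition above) =====
theorem sorting_in_groups_spec : Claim_equal_sorting_in_groups := by
  intro l hdom hpre
  show sorting_in_groups l = sorting_in_groups_alt l
  obtain ⟨M, hM⟩ : ∃ M, PySem.List.max? l (fun x => x) = some M := by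
    cases h : PySem.List.max? l (fun x => x) with
    | none => exact absurd ((PySem.List.max?_eq_none_iff l (fun x => x)).mp h) hpre
    | some M => exact ⟨M, rfl⟩
  have hq10 : (0:Int) < 10 := by norm_num
  set q := PySem.Int.floordiv (M + 9) 10 with hqdef
  have hMle : M ≤ q * 10 := by
    have h1 := PySem.Int.floordiv_mul_add_mod (M + 9) 10
    have h2 := PySem.Int.mod_nonneg (M + 9) hq10
    have h3 := PySem.Int.mod_lt (M + 9) hq10
    omega
  have hfd : PySem.Int.floordiv (q * 10) 10 = q := by
    rw [PySem.Int.floordiv_eq_iff_of_pos hq10]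
    constructor <;> nlinarith
  have htd : PySem.Int.truncdiv (q * 10) 10 = q := by
    show (q * 10).tdiv 10 = q
    exact Int.mul_tdiv_cancel q (by norm_num)
  simp only [sorting_in_groups, sorting_in_groups_alt, hM, Option.getD_some, ← hqdef, hfd, htd]
  by_cases h0 : q ≤ 0
  · rw [if_pos h0]
    have : q.toNat = 0 := by omega
    rw [this]
    rfl
  · rw [if_neg h0]
    have h1 : 1 ≤ q := by omega
    have hk : ((q.toNat : Nat) : Int) = q := by omega
    have hub : ∀ x ∈ l, x ≤ 10 * ((q.toNat : Nat) : Int) := by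
      intro x hx
      have := PySem.List.max?_isMax hM x hx
      simp only at this
      omega
    have hcm : q * 10 = 10 * ((q.toNat : Nat) : Int) := by omega
    rw [hcm, pv_loopA_char q.toNat l [] hub, List.nil_append]
    have hrange : q - 1 = ((q.toNat : Nat) : Int) - 1 := by omega
    rw [hrange, pv_pyRange_down q.toNat, List.map_map]
    apply List.map_congr_left
    intro i hi
    have hik : i < q.toNat := List.mem_range.mp (List.mem_reverse.mp hi)
    simp only [Function.comp_apply]
    rw [PySem.List.pyGetD_natCast]
    have hbuck : (sortingBucketsB l q).getD i []
        = l.filter (pvBucketP q i) := by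
      have := pv_bucketsB_char l (List.replicate q.toNat []) q h1
        (by rw [List.length_replicate]) i hik
      unfold sortingBucketsB
      rw [this, List.getD_replicate _ hik, List.nil_append]
    rw [hbuck, hk, mul_comm]
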